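-- pv_equiv track=rewrite | github.com/jelseg/adventoc2021 | day14/day14.py | all_after_10_steps
-- ===== SOURCE A (Python) =====
-- def oneStep(template,insertions):
--     ns = template[0]
--     l = len(template)
--     for i in range(l-1):
--         ns += insertions[template[i]+template[i+1]]
--         ns += template[i+1]
--     return ns
--
-- def all_after_10_steps(ins):
--     ins10 = {}
--     for k in ins:
--         t = k
--         for  i in range(10):
--             t = oneStep(t,ins)
--         ins10[k] = t
--     return ins10
-- ===== SOURCE B (Python) =====
-- def all_after_10_steps(ins):
--     # Recursive divide-and-conquer: expand(a, b, n) returns the full n-step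
--     # expansion of the 2-char template a+b; concatenations drop the shared
--     # leading character. ins[a+b] raises the same KeyError as A's oneStep.
--     def expand(a, b, n):
--         if n == 0:
--             return a + b
--         s = a + ins[a + b] + b
--         out = s[0]
--         for x, y in zip(s, s[1:]):
--             out += expand(x, y, n - 1)[1:]
--         return out
--     res = {}
--     for k in ins:
--         out = k[0]
--         for x, y in zip(k, k[1:]):
--             out += expand(x, y, 10)[1:]
--         res[k] = out
--     return res
-- ===== Notes on version B (the rewrite author's own statement) =====
-- stated objective: alternative
-- what changed: Replaces the 10 repeated whole-string left-to-right sweeps (oneStep applied 10 times) by a recursive divide-and-conquer pair expander expand(a,b,n) that builds each key's result as k[0] plus the overlap-dropped expansions of each adjacent pair, recursing over the binary expansion tree instead of re-scanning the growing string.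
import Mathlib
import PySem

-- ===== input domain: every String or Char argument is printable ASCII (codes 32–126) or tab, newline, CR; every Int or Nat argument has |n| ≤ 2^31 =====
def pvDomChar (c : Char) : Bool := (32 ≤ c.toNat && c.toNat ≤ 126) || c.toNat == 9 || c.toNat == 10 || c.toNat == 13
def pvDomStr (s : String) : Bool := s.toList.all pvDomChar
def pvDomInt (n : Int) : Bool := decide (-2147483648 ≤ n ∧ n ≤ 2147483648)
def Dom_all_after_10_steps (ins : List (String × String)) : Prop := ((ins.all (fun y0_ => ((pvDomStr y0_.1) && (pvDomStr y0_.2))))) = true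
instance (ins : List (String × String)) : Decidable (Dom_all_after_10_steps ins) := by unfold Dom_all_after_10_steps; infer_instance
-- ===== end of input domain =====

-- B replaces A's ten whole-string insertion sweeps by a recursive divide-and-conquer
-- pair expander (objective: alternative algorithm, same asymptotic cost).

-- ===== PORT A =====
-- insertions[k] / ins[k]: dict subscript on the association list (first match; the input
-- renders a Python dict, so keys are distinct and first match is the match).
def pvLookup (insertions : List (String × String)) (k : String) : String :=
  match insertions.find? (fun p => p.1 == k) with
  | some p => p.2
  | none => ""          -- KeyError in Python; Pre_ excludes inputs that reach this

-- oneStep(template, insertions)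
def oneStep (template : String) (insertions : List (String × String)) : String :=
  -- ns = template[0]  (IndexError on a zero-length template — excluded by Pre_; take 1 of the char list is exact otherwise)
  let ns : String := String.ofList (template.toList.take 1)
  let l : Int := PySem.Str.len template
  -- for i in range(l-1): ns += insertions[template[i]+template[i+1]]; ns += template[i+1]
  -- template[i] via pyGetD: i and i+1 are always in range inside the loop, so the default is never used
  (PySem.List.pyRange 0 (l - 1) 1).foldl
    (fun ns i =>
      let ci := PySem.List.pyGetD template.toList i ' '
      let cj := PySem.List.pyGetD template.toList (i + 1) ' '
      ns ++ pvLookup insertions (String.ofList [ci, cj]) ++ String.ofList [cj])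
    ns

def all_after_10_steps (ins : List (String × String)) : List (String × String) :=
  -- ins10 = empty dict; for k in ins: t = k; for i in range(10): t = oneStep(t, ins); ins10[k] = t
  -- (the input renders a Python dict, so keys are distinct and each insertion appends a fresh pair)
  ins.foldl
    (fun ins10 p =>
      let k := p.1
      let t := (PySem.List.pyRange 0 10 1).foldl (fun t _ => oneStep t ins) k
      ins10 ++ [(k, t)])
    []

-- ===== PORT B =====
-- expand(a, b, n): full n-step expansion of the 2-char template a+b.  a and b are the
-- single characters zip yields in Source B, so they are ported as Char (String.ofList [a] = the 1-char string a).
def pvExpand (ins : List (String × String)) (a b : Char) (n : Nat) : String :=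
  match n with
  | 0 => String.ofList [a, b]                    -- return a + b
  | n + 1 =>
    -- s = a + ins[a + b] + b
    let s := (String.ofList [a] ++ pvLookup ins (String.ofList [a, b]) ++ String.ofList [b]).toList
    -- out = s[0]  (s starts with a, so it is never empty)
    let out := String.ofList (s.take 1)
    -- for x, y in zip(s, s[1:]): out += expand(x, y, n-1)[1:]
    (s.zip s.tail).foldl
      (fun out xy => out ++ String.ofList ((pvExpand ins xy.1 xy.2 n).toList.tail))
      out

def all_after_10_steps_alt (ins : List (String × String)) : List (String × String) :=
  -- res = empty dict; for k in ins: out = k[0]; for x, y in zip(k, k[1:]): out += expand(x, y, 10)[1:]; res[k] = out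
  ins.foldl
    (fun res p =>
      let kl := p.1.toList
      let out := String.ofList (kl.take 1)       -- k[0] (k nonempty under Pre_)
      let out := (kl.zip kl.tail).foldl
        (fun out xy => out ++ String.ofList ((pvExpand ins xy.1 xy.2 10).toList.tail))
        out
      res ++ [(p.1, out)])
    []

-- ===== PRECONDITION & SPEC =====
-- pvOk ins n a b: expanding the adjacent pair (a, b) for n more steps looks up only
-- pairs present in the rule dict (tracks key membership only, computes no output).
def pvOk (ins : List (String × String)) : Nat → Char → Char → Bool
  | 0, _, _ => true
  | n + 1, a, b =>
    match ins.find? (fun p => p.1 == String.ofList [a, b]) with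
    | none => false
    | some p =>
      let s := a :: (p.2.toList ++ [b])
      (s.zip s.tail).all (fun xy => pvOk ins n xy.1 xy.2)

-- Pre_ excludes exactly the inputs on which the Python A raises: a zero-length key
-- (template[0] → IndexError) and rule sets where some adjacent pair reached within the
-- 10 insertion steps is missing from the dict (→ KeyError).
def Pre_all_after_10_steps (ins : List (String × String)) : Prop :=
  (∀ p ∈ ins, p.1 ≠ "") ∧
  (∀ p ∈ ins, ∀ xy ∈ p.1.toList.zip p.1.toList.tail, pvOk ins 10 xy.1 xy.2 = true)
instance (ins : List (String × String)) : Decidable (Pre_all_after_10_steps ins) := by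
  unfold Pre_all_after_10_steps; infer_instance

def pvWitness_all_after_10_steps : (List (String × String)) :=
  [("A", "X")]

def Spec_all_after_10_steps (ins : List (String × String)) (out : List (String × String)) : Prop :=
  out = all_after_10_steps_alt ins
instance (ins : List (String × String)) (out : List (String × String)) :
    Decidable (Spec_all_after_10_steps ins out) := by
  unfold Spec_all_after_10_steps; infer_instance

-- ===== CLAIM (what is proved, stated in full; the proofs are below) =====
def Claim_equal_all_after_10_steps : Prop :=
  ∀ (ins : List (String × String)), Dom_all_after_10_steps ins →
    Pre_all_after_10_steps ins →
      Spec_all_after_10_steps ins (all_after_10_steps ins)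


-- ===== LEMMAS AND PROOFS =====

-- the inserted characters for the pair (x, y), as a char list
def pvG (ins : List (String × String)) (x y : Char) : List Char :=
  (pvLookup ins (String.ofList [x, y])).toList

-- the adjacent pairs of a char list
def pvPairs (t : List Char) : List (Char × Char) := t.zip t.tail

-- one insertion step, char level
def pvStepC (ins : List (String × String)) (t : List Char) : List Char :=
  t.take 1 ++ (pvPairs t).flatMap (fun xy => pvG ins xy.1 xy.2 ++ [xy.2])

-- n insertion steps, char level
def pvIterC (ins : List (String × String)) : Nat → List Char → List Char
  | 0, t => t
  | n + 1, t => pvIterC ins n (pvStepC ins t)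

-- n-step expansion of a pair, char level
def pvExpC (ins : List (String × String)) : Nat → Char → Char → List Char
  | 0, a, b => [a, b]
  | n + 1, a, b =>
    let s := a :: (pvG ins a b ++ [b])
    s.take 1 ++ (pvPairs s).flatMap (fun xy => (pvExpC ins n xy.1 xy.2).tail)

-- B's per-template assembly, char level
def pvTop (ins : List (String × String)) (n : Nat) (t : List Char) : List Char :=
  t.take 1 ++ (pvPairs t).flatMap (fun xy => (pvExpC ins n xy.1 xy.2).tail)

theorem pvPairs_cons_cons (x c : Char) (l : List Char) :
    pvPairs (x :: c :: l) = (x, c) :: pvPairs (c :: l) := by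
  simp [pvPairs]

-- adjacent pairs of a concatenation that shares the endpoint y
theorem pvPairs_append_cons (xs : List Char) (y : Char) (ys : List Char) :
    pvPairs (xs ++ y :: ys) = pvPairs (xs ++ [y]) ++ pvPairs (y :: ys) := by
  induction xs with
  | nil => simp [pvPairs]
  | cons x xs ih =>
    cases xs with
    | nil => simp [pvPairs]
    | cons c r =>
      simp only [List.cons_append] at *
      rw [pvPairs_cons_cons, pvPairs_cons_cons, ih]
      simp

-- one step splits into the per-pair segments x · g(x,y) · y
theorem pvPairs_step (ins : List (String × String)) (a : Char) (r : List Char) :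
    pvPairs (pvStepC ins (a :: r)) =
      (pvPairs (a :: r)).flatMap
        (fun xy => pvPairs (xy.1 :: (pvG ins xy.1 xy.2 ++ [xy.2]))) := by
  induction r generalizing a with
  | nil => simp [pvStepC, pvPairs]
  | cons b r ih =>
    have hstep : pvStepC ins (a :: b :: r) =
        (a :: pvG ins a b) ++
          (b :: (pvPairs (b :: r)).flatMap (fun xy => pvG ins xy.1 xy.2 ++ [xy.2])) := by
      simp [pvStepC, pvPairs_cons_cons]
    have hstep2 : pvStepC ins (b :: r) =
        b :: (pvPairs (b :: r)).flatMap (fun xy => pvG ins xy.1 xy.2 ++ [xy.2]) := by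
      simp [pvStepC]
    rw [hstep, pvPairs_append_cons, ← hstep2, ih]
    simp [pvPairs_cons_cons]

-- a loop 'out += <string>' over any list, read at the char level
theorem pvFoldStr {α : Type} (l : List α) (f : α → String) (s0 : String) :
    (l.foldl (fun out x => out ++ f x) s0).toList
      = s0.toList ++ l.flatMap (fun x => (f x).toList) := by
  induction l generalizing s0 with
  | nil => simp
  | cons x l ih => simp [ih]

theorem pvExpandC (ins : List (String × String)) :
    ∀ (n : Nat) (a b : Char), (pvExpand ins a b n).toList = pvExpC ins n a b := by
  intro n
  induction n with
  | zero => intro a b; simp [pvExpand, pvExpC]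
  | succ n ih =>
    intro a b
    simp only [pvExpand]
    rw [pvFoldStr]
    simp [pvExpC, pvPairs, pvG, ih]

theorem pvLemIdx (ins : List (String × String)) (t : List Char) :
    ∀ (m : Nat), m ≤ t.tail.length →
      (List.range m).flatMap
          (fun (i : Nat) =>
            (pvLookup ins (String.ofList [PySem.List.pyGetD t ((i : Int)) ' ',
                PySem.List.pyGetD t ((i : Int) + 1) ' '])).toList
              ++ (String.ofList [PySem.List.pyGetD t ((i : Int) + 1) ' ']).toList)
        = ((pvPairs t).take m).flatMap (fun xy => pvG ins xy.1 xy.2 ++ [xy.2]) := by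
  intro m hm
  induction m with
  | zero => simp
  | succ m ih =>
    have hmt : m < t.tail.length := hm
    have hm1 : m < t.length := by
      have := t.length_tail; omega
    have hm2 : m + 1 < t.length := by
      have := t.length_tail; omega
    have hpl : m < (pvPairs t).length := by
      simp [pvPairs]; omega
    have h1 : PySem.List.pyGetD t (m : Int) ' ' = t[m] := by
      rw [PySem.List.pyGetD_natCast, List.getD_eq_getElem _ _ hm1]
    have h2 : PySem.List.pyGetD t ((m : Int) + 1) ' ' = t[m + 1] := by
      have : ((m : Int) + 1) = ((m + 1 : Nat) : Int) := by push_cast; ring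
      rw [this, PySem.List.pyGetD_natCast, List.getD_eq_getElem _ _ hm2]
    rw [List.range_succ, List.flatMap_append, ih (by omega),
        List.take_succ_eq_append_getElem hpl, List.flatMap_append]
    congr 1
    simp [h2, pvG, pvPairs, List.getElem_zip, List.getElem_tail, List.getElem?_eq_getElem hm1]

theorem pvOneStep (ins : List (String × String)) (t : String) :
    (oneStep t ins).toList = pvStepC ins t.toList := by
  cases h : t.toList with
  | nil =>
    simp [oneStep, pvStepC, pvPairs, h]
  | cons a r =>
    have hlen : PySem.Str.len t - 1 = ((r.length : Nat) : Int) := by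
      simp [PySem.Str.len_eq, h]
    simp only [oneStep, hlen, PySem.List.pyRange_zero_natCast, List.foldl_map,
      String.append_assoc]
    rw [pvFoldStr]
    have hidx := pvLemIdx ins t.toList r.length (by rw [h]; simp)
    have htake : ((pvPairs t.toList).take r.length) = pvPairs t.toList := by
      apply List.take_of_length_le
      simp [pvPairs, h]
    rw [htake] at hidx
    simp only [String.toList_append] at hidx ⊢
    rw [h] at hidx ⊢
    rw [hidx]
    simp [pvStepC]

theorem pvIterA (ins : List (String × String)) (l : List Int) (k : String) :
    ((l.foldl (fun t _ => oneStep t ins) k)).toList = pvIterC ins l.length k.toList := by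
  induction l generalizing k with
  | nil => simp [pvIterC]
  | cons x l ih =>
    rw [List.foldl_cons, ih, pvOneStep]
    simp [pvIterC]

theorem pvMain (ins : List (String × String)) :
    ∀ (n : Nat) (t : List Char), t ≠ [] → pvIterC ins n t = pvTop ins n t := by
  intro n
  induction n with
  | zero =>
    intro t ht
    cases t with
    | nil => exact absurd rfl ht
    | cons a r =>
      have hflat : (pvPairs (a :: r)).flatMap (fun xy => (pvExpC ins 0 xy.1 xy.2).tail)
          = ((a :: r).zip r).map Prod.snd := by
        simp only [pvPairs, pvExpC, List.tail_cons]
        rw [List.map_eq_flatMap]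
      simp only [pvIterC, pvTop, hflat]
      rw [List.map_snd_zip (by simp)]
      simp
  | succ n ih =>
    intro t ht
    cases t with
    | nil => exact absurd rfl ht
    | cons a r =>
      have hne : pvStepC ins (a :: r) ≠ [] := by simp [pvStepC]
      have htail : ∀ (x y : Char), (pvExpC ins (n + 1) x y).tail
          = (pvPairs (x :: (pvG ins x y ++ [y]))).flatMap
              (fun xy => (pvExpC ins n xy.1 xy.2).tail) := by
        intro x y; simp [pvExpC]
      simp only [pvIterC]
      rw [ih _ hne]
      unfold pvTop
      rw [pvPairs_step, List.flatMap_assoc]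
      simp only [htail]
      simp [pvStepC]

-- ===== VERDICT (by name: the statement is the Claim_ definition above) =====
theorem all_after_10_steps_spec : Claim_equal_all_after_10_steps := by
  intro ins _ hpre
  obtain ⟨hne, -⟩ := hpre
  show all_after_10_steps ins = all_after_10_steps_alt ins
  simp only [all_after_10_steps, all_after_10_steps_alt,
    PySem.List.foldl_append_singleton_eq_map, List.nil_append]
  apply List.map_congr_left
  intro p hp
  simp only [Prod.mk.injEq, true_and]
  apply String.toList_inj.mp
  rw [pvIterA]
  rw [show (PySem.List.pyRange 0 10 1).length = 10 from by decide]
  rw [pvFoldStr]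
  have hk : p.1.toList ≠ [] := by
    intro hnil
    exact hne p hp (String.toList_eq_nil_iff.mp hnil)
  rw [pvMain ins 10 _ hk]
  simp [pvTop, pvPairs, pvExpandC]
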